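-- pv_equiv track=rewrite | github.com/feyzasagman/collatz-rng | src/collatz_rng.py | collatz_weyl_rng
-- ===== SOURCE A (Python) =====
-- MASK32 = 0xFFFFFFFF
--
-- WEYL_C = 0x61C88647  # Weyl increment
--
-- def collatz_step(x: int) -> int:
--     return x // 2 if (x % 2 == 0) else (3 * x + 1)
--
-- def mix32(x: int) -> int:
--     """
--     32-bit karıştırma (dağılımı iyileştirmek için).
--     Kriptografik amaçla tasarlanmamıştır.
--     """
--     x &= MASK32
--     x ^= (x >> 16)
--     x = (x * 0x7FEB352D) & MASK32
--     x ^= (x >> 15)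
--     x = (x * 0x846CA68B) & MASK32
--     x ^= (x >> 16)
--     return x & MASK32
--
-- def collatz_weyl_rng(seed: int, n: int) -> list[int]:
--     x = seed
--     w = 0
--     out = []
--     for _ in range(n):
--         x = collatz_step(x)
--         w = (w + WEYL_C) & MASK32
--         out.append(mix32((x + w) & MASK32))
--     return out
-- ===== SOURCE B (Python) =====
-- MASK32 = 0xFFFFFFFF
--
-- WEYL_C = 0x61C88647
--
--
-- def collatz_weyl_rng(seed: int, n: int) -> list[int]:
--     # pass 1: collect the Collatz state after each step
--     xs = []
--     push = xs.append
--     x = seed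
--     for _ in range(n):
--         x = x // 2 if x % 2 == 0 else 3 * x + 1
--         push(x)
--     # pass 2: closed-form Weyl term ((i+1)*WEYL_C) & MASK32 (no running
--     # accumulator), with the 32-bit mixing steps applied inline
--     out = []
--     emit = out.append
--     c, m = WEYL_C, MASK32
--     for i, x in enumerate(xs):
--         v = (x + ((i + 1) * c & m)) & m
--         v ^= v >> 16
--         v = v * 0x7FEB352D & m
--         v ^= v >> 15
--         v = v * 0x846CA68B & m
--         v ^= v >> 16
--         emit(v & m)
--     return out
-- ===== Notes on version B (the rewrite author's own statement) =====
-- stated objective: alternative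
-- what changed: Replaced A's single loop with two running accumulators (Collatz state and Weyl counter) by a two-pass decomposition: first collect the Collatz state after each step into a list, then map over it with enumerate, computing the Weyl term by the closed form ((i+1)*WEYL_C) & MASK32 instead of a running accumulator.
import Mathlib
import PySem

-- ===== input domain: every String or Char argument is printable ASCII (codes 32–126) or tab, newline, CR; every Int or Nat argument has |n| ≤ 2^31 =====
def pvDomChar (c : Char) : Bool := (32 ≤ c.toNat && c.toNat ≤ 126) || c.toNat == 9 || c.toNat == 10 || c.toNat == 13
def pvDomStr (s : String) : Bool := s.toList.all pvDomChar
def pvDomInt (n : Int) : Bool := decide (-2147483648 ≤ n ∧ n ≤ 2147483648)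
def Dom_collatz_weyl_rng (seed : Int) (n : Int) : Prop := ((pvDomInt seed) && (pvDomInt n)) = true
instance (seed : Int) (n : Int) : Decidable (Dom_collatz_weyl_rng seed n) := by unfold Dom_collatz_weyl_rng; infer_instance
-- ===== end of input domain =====

-- B replaces A's single dual-accumulator loop by a Collatz-state table pass plus a
-- closed-form-Weyl mapping pass (objective: alternative decomposition, same cost).

-- ===== PORT A =====
-- x & 0xFFFFFFFF on an arbitrary Python int = x mod 2^32 (mask is all-ones; exact)
def pvMask32 (x : Int) : Int := x % 4294967296

def collatz_step (x : Int) : Int :=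
  if PySem.Int.mod x 2 = 0 then PySem.Int.floordiv x 2 else 3 * x + 1

-- shifts/xors act on the (nonnegative) masked value; done in Nat, exact for nonneg ints
def mix32 (x : Int) : Int :=
  let x0 := (pvMask32 x).toNat
  let x1 := x0 ^^^ (x0 >>> 16)
  let x2 := (x1 * 0x7FEB352D) % 4294967296
  let x3 := x2 ^^^ (x2 >>> 15)
  let x4 := (x3 * 0x846CA68B) % 4294967296
  let x5 := x4 ^^^ (x4 >>> 16)
  ((x5 % 4294967296 : Nat) : Int)

def WEYL_C : Int := 0x61C88647

-- 'for _ in range(n)' with state (x, w, out), as structural recursion over the trip count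
def loopA (x w : Int) (out : List Int) : Nat → List Int
  | 0 => out
  | k + 1 =>
      let x' := collatz_step x
      let w' := pvMask32 (w + WEYL_C)
      loopA x' w' (out ++ [mix32 (pvMask32 (x' + w'))]) k

def collatz_weyl_rng (seed : Int) (n : Int) : List Int :=
  loopA seed 0 [] n.toNat

-- ===== PORT B =====
def stepB (x : Int) : Int :=
  if PySem.Int.mod x 2 = 0 then PySem.Int.floordiv x 2 else 3 * x + 1

-- pass 1: the Collatz state after each of the k steps
def statesB (x : Int) : Nat → List Int
  | 0 => []
  | k + 1 => let y := stepB x; y :: statesB y k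

-- pass 2: closed-form Weyl term, mixing steps inline; after the first mask the
-- value is a nonnegative 32-bit int, so xors/shifts are done in Nat (exact)
def collatz_weyl_rng_alt (seed : Int) (n : Int) : List Int :=
  (statesB seed n.toNat).mapIdx (fun i x =>
    let v0 := ((x + ((i : Int) + 1) * WEYL_C % 4294967296) % 4294967296).toNat
    let v1 := v0 ^^^ (v0 >>> 16)
    let v2 := v1 * 0x7FEB352D % 4294967296
    let v3 := v2 ^^^ (v2 >>> 15)
    let v4 := v3 * 0x846CA68B % 4294967296
    let v5 := v4 ^^^ (v4 >>> 16)
    ((v5 % 4294967296 : Nat) : Int))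

-- ===== PRECONDITION & SPEC =====
def Spec_collatz_weyl_rng (seed : Int) (n : Int) (out : List Int) : Prop := out = collatz_weyl_rng_alt seed n
instance (seed : Int) (n : Int) (out : List Int) : Decidable (Spec_collatz_weyl_rng seed n out) := by unfold Spec_collatz_weyl_rng; infer_instance

-- ===== CLAIM (what is proved, stated in full; the proofs are below) =====
def Claim_equal_collatz_weyl_rng : Prop := ∀ (seed : Int) (n : Int), Dom_collatz_weyl_rng seed n → Spec_collatz_weyl_rng seed n (collatz_weyl_rng seed n)

-- ===== LEMMAS AND PROOFS =====

-- proof-side abbreviation for B's inlined mixing chain (with a leading mask)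
def mixB (x : Int) : Int :=
  let x0 := (x % 4294967296).toNat
  let x1 := x0 ^^^ (x0 >>> 16)
  let x2 := (x1 * 0x7FEB352D) % 4294967296
  let x3 := x2 ^^^ (x2 >>> 15)
  let x4 := (x3 * 0x846CA68B) % 4294967296
  let x5 := x4 ^^^ (x4 >>> 16)
  ((x5 % 4294967296 : Nat) : Int)

theorem stepAB : collatz_step = stepB := rfl

theorem mixAB : mix32 = mixB := rfl

theorem weyl_acc (j : Nat) :
    pvMask32 (((j : Int) * WEYL_C) % 4294967296 + WEYL_C)
      = (((j : Int) + 1) * WEYL_C) % 4294967296 := by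
  simp only [pvMask32]
  rw [add_one_mul, Int.emod_add_emod]

set_option maxRecDepth 4000 in
theorem loopA_eq (k : Nat) : ∀ (x : Int) (j : Nat) (out : List Int),
    loopA x (((j : Int) * WEYL_C) % 4294967296) out k
      = out ++ (statesB x k).mapIdx (fun i y =>
          mixB (((y + ((((j : Int) + (i : Int) + 1) * WEYL_C) % 4294967296))) % 4294967296)) := by
  induction k with
  | zero => intro x j out; simp [loopA, statesB]
  | succ k ih =>
      intro x j out
      rw [show loopA x (((j : Int) * WEYL_C) % 4294967296) out (k + 1)
            = loopA (collatz_step x)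
                (pvMask32 (((j : Int) * WEYL_C) % 4294967296 + WEYL_C))
                (out ++ [mix32 (pvMask32 (collatz_step x +
                  pvMask32 (((j : Int) * WEYL_C) % 4294967296 + WEYL_C)))]) k
          from by simp only [loopA]]
      rw [weyl_acc]
      have hc : (((j : Int) + 1)) = (((j + 1 : Nat) : Int)) := by push_cast; ring
      rw [hc, ih (collatz_step x) (j + 1)]
      simp only [statesB, List.mapIdx_cons, stepAB, mixAB, pvMask32,
        List.append_assoc, List.singleton_append]
      push_cast
      ring_nf

-- ===== VERDICT (by name: the statement is the Claim_ definition above) =====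
theorem collatz_weyl_rng_spec : Claim_equal_collatz_weyl_rng := by
  intro seed n _
  unfold Spec_collatz_weyl_rng collatz_weyl_rng collatz_weyl_rng_alt
  have h := loopA_eq n.toNat seed 0 []
  simp only [Nat.cast_zero, zero_mul, Int.zero_emod, zero_add, List.nil_append] at h
  rw [h]
  have hf : (fun (i : Nat) (y : Int) =>
        mixB ((y + ((i : Int) + 1) * WEYL_C % 4294967296) % 4294967296))
      = (fun (i : Nat) (x : Int) =>
    let v0 := ((x + ((i : Int) + 1) * WEYL_C % 4294967296) % 4294967296).toNat
    let v1 := v0 ^^^ (v0 >>> 16)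
    let v2 := v1 * 0x7FEB352D % 4294967296
    let v3 := v2 ^^^ (v2 >>> 15)
    let v4 := v3 * 0x846CA68B % 4294967296
    let v5 := v4 ^^^ (v4 >>> 16)
    ((v5 % 4294967296 : Nat) : Int)) := by
    funext i y
    simp only [mixB]
    rw [Int.emod_emod_of_dvd _ dvd_rfl]
  rw [hf]
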